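-- pv_equiv track=rewrite | github.com/Ad2266/CS529-Final | search_central_mul.py | _choose_initial_center
-- ===== SOURCE A (Python) =====
-- from typing import Iterable, List, Sequence, Set, Tuple, Optional
--
-- Edge = Tuple[int, int]
--
-- TriKey = Tuple[Edge, ...]
--
-- def edge_set_from_trikey(key: TriKey) -> Set[Edge]:
--     return set(key)
--
-- def _objective_sum(center_key: TriKey, tri_edge_sets: Sequence[Set[Edge]]) -> int:
--     center_edges = edge_set_from_trikey(center_key)
--     return sum(len(center_edges ^ edges_i) // 2 for edges_i in tri_edge_sets)
--
-- def _choose_initial_center(tri_keys: Sequence[TriKey], tri_edge_sets: Sequence[Set[Edge]]) -> Tuple[int, TriKey, int]: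
--     best_idx = 0
--     best_obj = float("inf")
--     for j, key in enumerate(tri_keys):
--         obj = _objective_sum(key, tri_edge_sets)
--         if obj < best_obj:
--             best_obj = obj
--             best_idx = j
--     return best_idx, tri_keys[best_idx], int(best_obj)
-- ===== SOURCE B (Python) =====
-- def _choose_initial_center(tri_keys, tri_edge_sets):
--     # One pass over tri_edge_sets builds an edge-frequency table plus size/parity
--     # aggregates; each center is then scored in O(|key|) instead of O(n*s).
--     n = len(tri_edge_sets)
--     cnt = {}
--     sum_half = 0
--     odd_count = 0
--     for edges in tri_edge_sets:
--         t = len(edges)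
--         sum_half += t // 2
--         odd_count += t % 2
--         for e in edges:
--             cnt[e] = cnt.get(e, 0) + 1
--     best_idx = None
--     best_obj = None
--     for j, key in enumerate(tri_keys):
--         s_edges = set(key)
--         s = len(s_edges)
--         obj = n * (s // 2) + sum_half + (s % 2) * odd_count - sum(cnt.get(e, 0) for e in s_edges)
--         if best_obj is None or obj < best_obj:
--             best_obj = obj
--             best_idx = j
--     return best_idx, tri_keys[best_idx], best_obj
-- ===== Notes on version B (the rewrite author's own statement) =====
-- stated objective: faster
-- what changed: Instead of recomputing the symmetric difference against every edge set for every candidate center (O(n^2*s)), B makes one pass over tri_edge_sets building an edge-frequency table plus size/parity aggregates, then scores each center in O(|key|) via |SxT|//2 = s//2 + t//2 + (s%2)(t%2) - |S∩T|.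
import Mathlib
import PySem

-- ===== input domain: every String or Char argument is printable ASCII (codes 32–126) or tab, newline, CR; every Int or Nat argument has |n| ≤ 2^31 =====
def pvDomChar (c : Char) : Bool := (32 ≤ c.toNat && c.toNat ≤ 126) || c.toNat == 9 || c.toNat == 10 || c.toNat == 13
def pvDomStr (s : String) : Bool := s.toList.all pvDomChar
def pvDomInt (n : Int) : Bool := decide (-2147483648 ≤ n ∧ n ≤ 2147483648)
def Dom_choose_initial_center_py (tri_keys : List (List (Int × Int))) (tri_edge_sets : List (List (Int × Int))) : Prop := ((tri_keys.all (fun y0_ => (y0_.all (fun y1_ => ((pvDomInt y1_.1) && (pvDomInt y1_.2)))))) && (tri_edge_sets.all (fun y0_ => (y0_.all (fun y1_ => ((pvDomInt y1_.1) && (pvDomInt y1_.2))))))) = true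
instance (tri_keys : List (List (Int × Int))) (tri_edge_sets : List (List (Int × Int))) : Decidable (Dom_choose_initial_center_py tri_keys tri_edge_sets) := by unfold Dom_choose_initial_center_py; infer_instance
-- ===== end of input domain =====

-- B replaces A's per-center rescan of all edge sets by a precomputed edge-frequency
-- table and size/parity aggregates: same result, O(n*s) instead of O(n^2*s).
-- Each inner list of tri_edge_sets models a Python set (distinct elements); both ports
-- rebuild the set value with PySem.Set.ofList, which is exact.

-- ===== PORT A =====
-- _objective_sum: sum(len(center_edges ^ edges_i) // 2 for edges_i in tri_edge_sets)
def pvObjSum (center_key : List (Int × Int)) (tri_edge_sets : List (List (Int × Int))) : Int :=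
  let center_edges : PySem.Set (Int × Int) := PySem.Set.ofList center_key
  (tri_edge_sets.map (fun edges_i =>
     PySem.Int.floordiv ((PySem.Set.symmDiff center_edges (PySem.Set.ofList edges_i)).length : Int) 2)).sum

-- A's loop body; best_obj = none models the initial float("inf") (any obj < inf).
def pvStepA (sc : List (Int × Int) → Int) (st : Int × Option Int) (jk : Int × List (Int × Int)) : Int × Option Int :=
  let obj := sc jk.2
  match st.2 with
  | none => (jk.1, some obj)
  | some b => if obj < b then (jk.1, some obj) else st

def choose_initial_center_py (tri_keys : List (List (Int × Int))) (tri_edge_sets : List (List (Int × Int))) : Int × (List (Int × Int)) × Int :=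
  let st := (PySem.List.enumerate tri_keys 0).foldl (pvStepA (fun key => pvObjSum key tri_edge_sets)) (0, none)
  -- tri_keys[best_idx] raises IndexError and int(inf) raises on empty tri_keys: excluded by Pre_; the defaults are never reached under Pre_.
  (st.1, (PySem.List.pyGet? tri_keys st.1).getD [], st.2.getD 0)

-- ===== PORT B =====
-- obj = n*(s//2) + sum_half + (s%2)*odd_count - sum(cnt.get(e,0) for e in s_edges)
def pvScoreB (n sumHalf oddC : Int) (cnt : PySem.Dict (Int × Int) Int) (key : List (Int × Int)) : Int :=
  let s_edges : PySem.Set (Int × Int) := PySem.Set.ofList key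
  let s : Int := s_edges.length
  n * PySem.Int.floordiv s 2 + sumHalf + PySem.Int.mod s 2 * oddC
    - (s_edges.map (fun e => cnt.getD e 0)).sum

-- B's loop body: 'if best_obj is None or obj < best_obj'
def pvStepB (sc : List (Int × Int) → Int) (st : Option (Int × Int)) (jk : Int × List (Int × Int)) : Option (Int × Int) :=
  let obj := sc jk.2
  match st with
  | none => some (jk.1, obj)
  | some (_, bo) => if obj < bo then some (jk.1, obj) else st

def choose_initial_center_py_alt (tri_keys : List (List (Int × Int))) (tri_edge_sets : List (List (Int × Int))) : Int × (List (Int × Int)) × Int :=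
  let n : Int := tri_edge_sets.length
  -- one pass: cnt[e] = cnt.get(e,0)+1; sum_half += t//2; odd_count += t%2
  let pre := tri_edge_sets.foldl
    (fun (st : PySem.Dict (Int × Int) Int × Int × Int) edges0 =>
      let edges : PySem.Set (Int × Int) := PySem.Set.ofList edges0
      let t : Int := edges.length
      (edges.foldl (fun d e => d.insert e (d.getD e 0 + 1)) st.1,
       st.2.1 + PySem.Int.floordiv t 2,
       st.2.2 + PySem.Int.mod t 2))
    (PySem.Dict.empty, 0, 0)
  match (PySem.List.enumerate tri_keys 0).foldl (pvStepB (pvScoreB n pre.2.1 pre.2.2 pre.1)) none with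
  | none => (0, [], 0)   -- only for empty tri_keys, where Python B raises; outside Pre_
  | some (bi, bo) => (bi, (PySem.List.pyGet? tri_keys bi).getD [], bo)

-- ===== PRECONDITION & SPEC =====
-- A raises on empty tri_keys (int(float("inf")) / tri_keys[0]); excluded.
def Pre_choose_initial_center_py (tri_keys : List (List (Int × Int))) (tri_edge_sets : List (List (Int × Int))) : Prop := tri_keys ≠ []
instance (tri_keys : List (List (Int × Int))) (tri_edge_sets : List (List (Int × Int))) : Decidable (Pre_choose_initial_center_py tri_keys tri_edge_sets) := by unfold Pre_choose_initial_center_py; infer_instance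
def pvWitness_choose_initial_center_py : (List (List (Int × Int))) × (List (List (Int × Int))) := ([[(0, 1)]], [[(0, 1)], []])

def Spec_choose_initial_center_py (tri_keys : List (List (Int × Int))) (tri_edge_sets : List (List (Int × Int))) (out : Int × (List (Int × Int)) × Int) : Prop := out = choose_initial_center_py_alt tri_keys tri_edge_sets
instance (tri_keys : List (List (Int × Int))) (tri_edge_sets : List (List (Int × Int))) (out : Int × (List (Int × Int)) × Int) : Decidable (Spec_choose_initial_center_py tri_keys tri_edge_sets out) := by unfold Spec_choose_initial_center_py; infer_instance

-- ===== CLAIM (what is proved, stated in full; the proofs are below) =====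
def Claim_equal_choose_initial_center_py : Prop := ∀ (tri_keys : List (List (Int × Int))) (tri_edge_sets : List (List (Int × Int))), Dom_choose_initial_center_py tri_keys tri_edge_sets → Pre_choose_initial_center_py tri_keys tri_edge_sets → Spec_choose_initial_center_py tri_keys tri_edge_sets (choose_initial_center_py tri_keys tri_edge_sets)

-- ===== LEMMAS AND PROOFS =====

-- the (deduplicated) edge sets, concatenated: what B's frequency table counts
def pvFlat (ts : List (List (Int × Int))) : List (Int × Int) :=
  ts.flatMap (fun T0 => PySem.Set.ofList T0)

def pvSumHalf (ts : List (List (Int × Int))) : Int :=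
  (ts.map (fun T0 => PySem.Int.floordiv ((PySem.Set.ofList T0).length : Int) 2)).sum

def pvOdd (ts : List (List (Int × Int))) : Int :=
  (ts.map (fun T0 => PySem.Int.mod ((PySem.Set.ofList T0).length : Int) 2)).sum

lemma pv_pre_eq (ts : List (List (Int × Int))) :
    ∀ (d : PySem.Dict (Int × Int) Int) (x y : Int),
    ts.foldl (fun (st : PySem.Dict (Int × Int) Int × Int × Int) edges0 =>
      let edges : PySem.Set (Int × Int) := PySem.Set.ofList edges0
      let t : Int := edges.length
      (edges.foldl (fun d e => d.insert e (d.getD e 0 + 1)) st.1,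
       st.2.1 + PySem.Int.floordiv t 2,
       st.2.2 + PySem.Int.mod t 2)) (d, x, y)
    = ((pvFlat ts).foldl (fun d e => d.insert e (d.getD e 0 + 1)) d, x + pvSumHalf ts, y + pvOdd ts) := by
  induction ts with
  | nil => intro d x y; simp [pvFlat, pvSumHalf, pvOdd]
  | cons T0 rest ih =>
    intro d x y
    simp only [List.foldl_cons]
    rw [ih]
    simp only [pvFlat, pvSumHalf, pvOdd, List.flatMap_cons, List.foldl_append,
               List.map_cons, List.sum_cons, Prod.mk.injEq]
    exact ⟨trivial, by ring, by ring⟩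

lemma pv_inter_comm (S T : List (Int × Int)) (hS : S.Nodup) (hT : T.Nodup) :
    (S.filter (fun e => decide (e ∈ T))).length = (T.filter (fun e => decide (e ∈ S))).length := by
  refine List.Perm.length_eq ?_
  refine (List.perm_ext_iff_of_nodup (hS.filter _) (hT.filter _)).mpr ?_
  intro a
  simp only [List.mem_filter, decide_eq_true_eq]
  tauto

-- per-set identity: |S ^ T| // 2 = s//2 + t//2 + (s%2)*(t%2) - |S ∩ T|
lemma pv_term_eq (S T : PySem.Set (Int × Int)) (hS : S.Nodup) (hT : T.Nodup) :
    PySem.Int.floordiv ((PySem.Set.symmDiff S T).length : Int) 2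
      = PySem.Int.floordiv (S.length : Int) 2 + PySem.Int.floordiv (T.length : Int) 2
        + PySem.Int.mod (S.length : Int) 2 * PySem.Int.mod (T.length : Int) 2
        - ((S.filter (fun e => decide (e ∈ T))).length : Int) := by
  have hc := pv_inter_comm S T hS hT
  have h1 : (S.filter (fun e => decide (e ∈ T))).length
      + (S.filter (fun e => !decide (e ∈ T))).length = S.length := by
    simpa using (List.length_eq_length_filter_add (l := S) (fun e => decide (e ∈ T))).symm
  have h2 : (T.filter (fun e => decide (e ∈ S))).length
      + (T.filter (fun e => !decide (e ∈ S))).length = T.length := by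
    simpa using (List.length_eq_length_filter_add (l := T) (fun e => decide (e ∈ S))).symm
  have hsd : (PySem.Set.symmDiff S T).length
      = (S.filter (fun e => !decide (e ∈ T))).length
        + (T.filter (fun e => !decide (e ∈ S))).length := by
    simp [PySem.Set.symmDiff, PySem.Set.diff, List.contains_eq_mem]
  rw [hsd, PySem.Int.floordiv_eq_ediv_of_pos (by norm_num),
      PySem.Int.floordiv_eq_ediv_of_pos (by norm_num),
      PySem.Int.floordiv_eq_ediv_of_pos (by norm_num),
      PySem.Int.mod_eq_emod_of_pos (by norm_num),
      PySem.Int.mod_eq_emod_of_pos (by norm_num)]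
  have hp : (S.length : Int) % 2 = 0 ∨ (S.length : Int) % 2 = 1 := by omega
  have hq : (T.length : Int) % 2 = 0 ∨ (T.length : Int) % 2 = 1 := by omega
  rcases hp with h | h <;> rcases hq with h' | h' <;> rw [h, h'] <;> omega

lemma pv_count_indicator (S T0 : List (Int × Int)) :
    ((PySem.Set.ofList S).map (fun e => (List.count e (PySem.Set.ofList T0) : Int))).sum
      = (((PySem.Set.ofList S).filter (fun e => decide (e ∈ PySem.Set.ofList T0))).length : Int) := by
  have h1 : ∀ e : Int × Int, (List.count e (PySem.Set.ofList T0) : Int)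
      = if decide (e ∈ PySem.Set.ofList T0) = true then (1 : Int) else 0 := by
    intro e
    rw [List.Nodup.count (PySem.Set.nodup_ofList T0)]
    by_cases h : e ∈ PySem.Set.ofList T0 <;> simp [h]
  calc ((PySem.Set.ofList S).map (fun e => (List.count e (PySem.Set.ofList T0) : Int))).sum
      = ((PySem.Set.ofList S).map
          (fun e => if decide (e ∈ PySem.Set.ofList T0) = true then (1 : Int) else 0)).sum := by
        simp only [h1]
    _ = (List.countP (fun e => decide (e ∈ PySem.Set.ofList T0)) (PySem.Set.ofList S) : Int) :=
        PySem.List.sum_map_ite_one_zero _ _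
    _ = _ := by rw [List.countP_eq_length_filter]

lemma pv_score_eq (key : List (Int × Int)) (ts : List (List (Int × Int))) :
    pvObjSum key ts
      = pvScoreB (ts.length : Int) (pvSumHalf ts) (pvOdd ts)
          (PySem.Dict.counter (pvFlat ts)) key := by
  induction ts with
  | nil =>
    simp [pvObjSum, pvScoreB, pvSumHalf, pvOdd, pvFlat, PySem.Dict.getD_counter]
  | cons T0 rest ih =>
    have hterm := pv_term_eq (PySem.Set.ofList key) (PySem.Set.ofList T0)
      (PySem.Set.nodup_ofList key) (PySem.Set.nodup_ofList T0)
    have hcnt := pv_count_indicator key T0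
    simp only [pvObjSum, List.map_cons, List.sum_cons] at ih ⊢
    rw [ih]
    simp only [pvScoreB, PySem.Dict.getD_counter, pvFlat, List.flatMap_cons,
               pvSumHalf, pvOdd, List.map_cons, List.sum_cons, List.length_cons]
    push_cast [List.count_append]
    rw [PySem.List.sum_map_add_int]
    linear_combination hterm + hcnt

def pvConv (st : Int × Option Int) : Option (Int × Int) := st.2.map (fun b => (st.1, b))

lemma pv_loop_comm (sc : List (Int × Int) → Int) :
    ∀ (l : List (Int × List (Int × Int))) (st : Int × Option Int),
    l.foldl (pvStepB sc) (pvConv st) = pvConv (l.foldl (pvStepA sc) st) := by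
  intro l
  induction l with
  | nil => intro st; rfl
  | cons x l ih =>
    intro st
    have h : pvStepB sc (pvConv st) x = pvConv (pvStepA sc st x) := by
      obtain ⟨i, ob⟩ := st
      cases ob with
      | none => rfl
      | some b =>
        simp only [pvStepA, pvStepB, pvConv, Option.map_some]
        split <;> rfl
    rw [List.foldl_cons, List.foldl_cons, h, ih]

lemma pv_loop_some (sc : List (Int × Int) → Int) :
    ∀ (l : List (Int × List (Int × Int))) (st : Int × Option Int), st.2.isSome →
    (l.foldl (pvStepA sc) st).2.isSome := by
  intro l
  induction l with
  | nil => intro st h; exact h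
  | cons x l ih =>
    intro st h
    rw [List.foldl_cons]
    refine ih _ ?_
    obtain ⟨i, ob⟩ := st
    cases ob with
    | none => simp at h
    | some b =>
      have : pvStepA sc (i, some b) x
          = if sc x.2 < b then (x.1, some (sc x.2)) else (i, some b) := rfl
      rw [this]
      split <;> simp

-- ===== VERDICT (by name: the statement is the Claim_ definition above) =====
theorem choose_initial_center_py_spec : Claim_equal_choose_initial_center_py := by
  intro tri_keys tri_edge_sets _ hpre
  unfold Spec_choose_initial_center_py
  cases tri_keys with
  | nil => exact absurd rfl hpre
  | cons k tk' =>
    simp only [choose_initial_center_py, choose_initial_center_py_alt]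
    rw [pv_pre_eq tri_edge_sets PySem.Dict.empty 0 0]
    rw [PySem.Dict.foldl_insert_getD_add_one_eq_counter]
    have hsc : pvScoreB (tri_edge_sets.length : Int) (0 + pvSumHalf tri_edge_sets)
        (0 + pvOdd tri_edge_sets) (PySem.Dict.counter (pvFlat tri_edge_sets))
        = fun key => pvObjSum key tri_edge_sets := by
      funext key
      rw [zero_add, zero_add, ← pv_score_eq]
    rw [hsc]
    rw [PySem.List.enumerate_cons, List.foldl_cons, List.foldl_cons]
    have hstep : pvStepB (fun key => pvObjSum key tri_edge_sets) none (0, k)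
        = pvConv (pvStepA (fun key => pvObjSum key tri_edge_sets) (0, none) (0, k)) := rfl
    rw [hstep, pv_loop_comm]
    have hs : ((PySem.List.enumerate tk' 1).foldl
        (pvStepA (fun key => pvObjSum key tri_edge_sets))
        (pvStepA (fun key => pvObjSum key tri_edge_sets) (0, none) (0, k))).2.isSome :=
      pv_loop_some _ _ _ rfl
    obtain ⟨b, hb⟩ := Option.isSome_iff_exists.mp hs
    simp [pvConv, hb]
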